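-- pv_equiv track=rewrite | github.com/mblsha/retrobus-explorer | gateware/reference/spade-projects/sharp-pc-e500-card-spade/experiments/experiment_catalog.py | build_asm_pushu_popu_f_chain
-- ===== SOURCE A (Python) =====
-- def build_asm_pushu_popu_f_chain(count: int) -> str:
--     lines = [
--         ".ORG 0x10100",
--         "",
--         "start:",
--         "    SC",
--     ]
--     for _ in range(count):
--         lines.append("    PUSHU F")
--         lines.append("    POPU F")
--     lines.append("    RETF")
--     lines.append("")
--     return "\n".join(lines)
-- ===== SOURCE B (Python) =====
-- def build_asm_pushu_popu_f_chain(count: int) -> str: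
--     header = ".ORG 0x10100\n\nstart:\n    SC\n"
--     block = "    PUSHU F\n    POPU F\n" * count
--     footer = "    RETF\n"
--     return header + block + footer
-- ===== Notes on version B (the rewrite author's own statement) =====
-- stated objective: simpler
-- what changed: Replaces the list-building loop plus '\n'.join with a closed-form concatenation: constant header/footer strings and string multiplication for the repeated PUSHU/POPU block.
import Mathlib
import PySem

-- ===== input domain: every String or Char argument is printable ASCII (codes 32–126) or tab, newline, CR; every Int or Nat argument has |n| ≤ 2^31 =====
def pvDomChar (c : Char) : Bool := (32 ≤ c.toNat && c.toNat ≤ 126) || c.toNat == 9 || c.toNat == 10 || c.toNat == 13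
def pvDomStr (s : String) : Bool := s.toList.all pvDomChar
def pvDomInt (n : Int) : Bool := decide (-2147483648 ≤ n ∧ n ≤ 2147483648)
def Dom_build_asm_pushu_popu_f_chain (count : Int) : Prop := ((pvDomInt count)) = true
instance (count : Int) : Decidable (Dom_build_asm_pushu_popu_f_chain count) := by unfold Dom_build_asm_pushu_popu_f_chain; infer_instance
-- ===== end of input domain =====

-- B replaces A's list-building loop + "\n".join by a closed-form concatenation
-- header ++ (block * count) ++ footer; objective: simpler, same O(count) cost.

-- ===== PORT A =====
def build_asm_pushu_popu_f_chain (count : Int) : String :=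
  let lines : List String := [".ORG 0x10100", "", "start:", "    SC"]
  let lines := (PySem.List.pyRange 0 count 1).foldl
    (fun acc _ => acc ++ ["    PUSHU F", "    POPU F"]) lines
  let lines := lines ++ ["    RETF", ""]
  PySem.Str.join "\n" lines

-- ===== PORT B =====
-- port of Python's `s * n` on strings (negative n gives ""): ''.join of n copies
def pvStrMul (s : String) (n : Int) : String :=
  PySem.Str.join "" (List.replicate n.toNat s)

def build_asm_pushu_popu_f_chain_alt (count : Int) : String :=
  ".ORG 0x10100\n\nstart:\n    SC\n"
    ++ pvStrMul "    PUSHU F\n    POPU F\n" count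
    ++ "    RETF\n"

-- ===== PRECONDITION & SPEC =====
def Spec_build_asm_pushu_popu_f_chain (count : Int) (out : String) : Prop := out = build_asm_pushu_popu_f_chain_alt count
instance (count : Int) (out : String) : Decidable (Spec_build_asm_pushu_popu_f_chain count out) := by unfold Spec_build_asm_pushu_popu_f_chain; infer_instance

-- ===== CLAIM (what is proved, stated in full; the proofs are below) =====
def Claim_equal_build_asm_pushu_popu_f_chain : Prop := ∀ (count : Int), Dom_build_asm_pushu_popu_f_chain count → Spec_build_asm_pushu_popu_f_chain count (build_asm_pushu_popu_f_chain count)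

-- ===== LEMMAS AND PROOFS =====

-- A's loop appends a constant pair each iteration: foldl = init ++ |l| flattened copies.
theorem pv_foldl_append_const {α : Type} (pq : List String) :
    ∀ (l : List α) (init : List String),
      l.foldl (fun acc _ => acc ++ pq) init
        = init ++ (List.replicate l.length pq).flatten := by
  intro l
  induction l with
  | nil => intro init; simp
  | cons a t ih =>
      intro init
      simp only [List.foldl_cons, List.length_cons, ih, List.replicate_succ]
      simp [List.append_assoc]

-- peel one element off a join when the rest is nonempty
theorem pv_join_cons_ne (sep a : List Char) (l : List (List Char)) (h : l ≠ []) :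
    PySem.Chars.join sep (a :: l) = a ++ sep ++ PySem.Chars.join sep l := by
  cases l with
  | nil => exact absurd rfl h
  | cons b t => exact PySem.Chars.join_cons_cons sep a b t

-- char-level core: the "\n"-join of n PUSHU/POPU pairs followed by the tail
theorem pv_join_rep (n : Nat) :
    PySem.Chars.join "\n".toList
        ((List.replicate n ["    PUSHU F".toList, "    POPU F".toList]).flatten
          ++ ["    RETF".toList, ([] : List Char)])
      = (List.replicate n "    PUSHU F\n    POPU F\n".toList).flatten
          ++ "    RETF\n".toList := by
  induction n with
  | zero => decide
  | succ k ih =>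
      simp only [List.replicate_succ, List.flatten_cons, List.cons_append, List.nil_append]
      rw [List.append_assoc]
      rw [pv_join_cons_ne _ _ _ (by simp), pv_join_cons_ne _ _ _ (by simp)]
      rw [ih]
      simp only [← List.append_assoc]
      congr 2

-- ===== VERDICT (by name: the statement is the Claim_ definition above) =====
-- ''.join = flatten when the separator is empty
theorem pv_join_empty_sep (l : List (List Char)) :
    PySem.Chars.join [] l = l.flatten := by
  induction l with
  | nil => decide
  | cons a t ih =>
      cases t with
      | nil => simp [PySem.Chars.join, List.intercalate]
      | cons b u =>
          rw [pv_join_cons_ne _ _ _ (by simp), ih]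
          simp

theorem build_asm_pushu_popu_f_chain_spec : Claim_equal_build_asm_pushu_popu_f_chain := by
  intro count _
  unfold Spec_build_asm_pushu_popu_f_chain
  refine String.toList_inj.mp ?_
  unfold build_asm_pushu_popu_f_chain build_asm_pushu_popu_f_chain_alt pvStrMul
  simp only []
  rw [pv_foldl_append_const]
  rw [PySem.Str.toList_join]
  simp only [String.toList_append, PySem.Str.toList_join, PySem.List.length_pyRange_one,
    Int.sub_zero, List.map_append, List.map_flatten, List.map_replicate, List.map_cons,
    List.map_nil]
  rw [show ("" : String).toList = [] from rfl, pv_join_empty_sep]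
  simp only [List.cons_append, List.nil_append]
  rw [pv_join_cons_ne _ _ _ (by simp), pv_join_cons_ne _ _ _ (by simp),
      pv_join_cons_ne _ _ _ (by simp), pv_join_cons_ne _ _ _ (by simp)]
  rw [pv_join_rep]
  simp only [← List.append_assoc]
  congr 2
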